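-- pv_equiv track=rewrite | github.com/Instigate-Training-Center-11/ITC11 | Python/21_07_2020/sortRows.py | sortFirstString
-- ===== SOURCE A (Python) =====
-- def sortFirstString(a, b):
--     aa = str(a)
--     bb = str(b)
--     if len(a) > len(b):
--         return 1
--     if len(a) < len(b):
--         return -1
--
--     aaaa = ""
--     bbbb = ""
--     for i in range(0, len(a)):
--         if not a[i].isdigit():
--             aaaa += a[i]
--         if not b[i].isdigit():
--             bbbb += b[i]
--     if aaaa > bbbb:
--         return 1
--     elif aaaa < bbbb:
--         return -1
--     else:
--         return 0
--
--     aaa = 0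
--     bbb = 0
--     for i in range(0, len(a)):
--         if a[i].isdigit():
--             aaa += int(a[i])
--         if b[i].isdigit():
--             bbb += int(b[i])
--     if aaa > bbb:
--         return 1
--     elif aaa < bbb:
--         return -1
--     else:
--         return 0
-- ===== SOURCE B (Python) =====
-- def sortFirstString(a, b):
--     n = len(a)
--     m = len(b)
--     if n != m:
--         return 1 if n > m else -1
--     i = 0
--     j = 0
--     while True:
--         while i < n and a[i].isdigit():
--             i += 1
--         while j < n and b[j].isdigit():
--             j += 1
--         if i == n or j == n:
--             return (1 if j == n else 0) - (1 if i == n else 0)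
--         if a[i] != b[j]:
--             return 1 if a[i] > b[j] else -1
--         i += 1
--         j += 1
-- ===== Notes on version B (the rewrite author's own statement) =====
-- stated objective: alternative
-- what changed: Replaces A's strategy of materialising both digit-stripped strings with a parallel '+=' accumulation loop and then comparing them, by a single early-exit two-pointer scan: each pointer skips digits in place and the first differing non-digit characters (or one side running out) decide the sign, so no intermediate strings are ever built.
import Mathlib
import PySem

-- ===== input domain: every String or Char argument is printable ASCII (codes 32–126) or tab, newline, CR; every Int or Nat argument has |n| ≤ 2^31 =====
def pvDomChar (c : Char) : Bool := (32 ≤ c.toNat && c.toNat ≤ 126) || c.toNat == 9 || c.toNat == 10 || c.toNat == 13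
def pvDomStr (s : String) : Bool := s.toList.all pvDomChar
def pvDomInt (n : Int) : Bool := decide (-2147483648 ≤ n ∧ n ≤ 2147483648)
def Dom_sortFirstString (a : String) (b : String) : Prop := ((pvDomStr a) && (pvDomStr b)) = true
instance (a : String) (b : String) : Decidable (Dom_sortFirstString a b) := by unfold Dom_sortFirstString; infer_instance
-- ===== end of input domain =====

-- B replaces A's build-two-filtered-strings-then-compare by a single early-exit two-pointer
-- scan that skips digits on each side and compares characters in place (objective: alternative).

-- ===== PORT A =====
def sortFirstString (a : String) (b : String) : Int :=
  let _aa := a  -- str(a) on a str is the identity; unused, as in the Python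
  let _bb := b
  if (a.length : Int) > (b.length : Int) then 1
  else if (a.length : Int) < (b.length : Int) then -1
  else
    -- for i in range(0, len(a)): two independent appends guarded by isdigit
    let p := (PySem.List.pyRange 0 (a.length : Int) 1).foldl
      (fun (p : List Char × List Char) i =>
        ((if !(PySem.Chars.isdigit (PySem.List.pyGetD a.toList i ' ')) then
            p.1 ++ [PySem.List.pyGetD a.toList i ' '] else p.1),
         (if !(PySem.Chars.isdigit (PySem.List.pyGetD b.toList i ' ')) then
            p.2 ++ [PySem.List.pyGetD b.toList i ' '] else p.2)))
      ([], [])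
    if String.ofList p.2 < String.ofList p.1 then 1
    else if String.ofList p.1 < String.ofList p.2 then -1
    else 0
    -- the digit-sum loop after this return is unreachable in the Python and is not ported

-- ===== PORT B =====
-- 'while i < n and s[i].isdigit(): i += 1'
def pvSkipIdx (s : List Char) (n : Nat) (i : Nat) : Nat :=
  if h : i < n ∧ PySem.Chars.isdigit (s.getD i ' ') then pvSkipIdx s n (i + 1) else i
  termination_by n - i
  decreasing_by omega

theorem pvSkipIdx_ge (s : List Char) (n i : Nat) : i ≤ pvSkipIdx s n i := by
  fun_induction pvSkipIdx with
  | case1 i h ih => omega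
  | case2 i h => omega

-- the outer 'while True' loop of B, with the two inner digit-skipping loops;
-- '≥ n' (Python writes '== n') is the same test on every reachable state i,j ≤ n
-- and merely makes the recursion total
def pvScan (sa sb : List Char) (n : Nat) (i j : Nat) : Int :=
  let i' := pvSkipIdx sa n i
  let j' := pvSkipIdx sb n j
  if i' ≥ n ∨ j' ≥ n then
    (if j' ≥ n then (1 : Int) else 0) - (if i' ≥ n then (1 : Int) else 0)
  else if sa.getD i' ' ' ≠ sb.getD j' ' ' then
    (if sb.getD j' ' ' < sa.getD i' ' ' then 1 else -1)
  else pvScan sa sb n (i' + 1) (j' + 1)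
  termination_by n - i
  decreasing_by
    have := pvSkipIdx_ge sa n i
    omega

def sortFirstString_alt (a : String) (b : String) : Int :=
  let n := a.length
  let m := b.length
  if n ≠ m then (if m < n then 1 else -1)
  else pvScan a.toList b.toList n 0 0

-- ===== PRECONDITION & SPEC =====
def Spec_sortFirstString (a : String) (b : String) (out : Int) : Prop := out = sortFirstString_alt a b
instance (a : String) (b : String) (out : Int) : Decidable (Spec_sortFirstString a b out) := by unfold Spec_sortFirstString; infer_instance

-- ===== CLAIM (what is proved, stated in full; the proofs are below) =====
def Claim_equal_sortFirstString : Prop := ∀ (a : String) (b : String), Dom_sortFirstString a b → Spec_sortFirstString a b (sortFirstString a b)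

-- ===== LEMMAS AND PROOFS =====

-- a fold whose two components are updated independently splits into two folds
theorem pvFoldl_pair {α β γ : Type} (l : List γ) (g : α → γ → α) (h : β → γ → β)
    (pa : α) (pb : β) :
    l.foldl (fun p i => (g p.1 i, h p.2 i)) (pa, pb) = (l.foldl g pa, l.foldl h pb) := by
  induction l generalizing pa pb with
  | nil => rfl
  | cons x xs ih => simpa using ih (g pa x) (h pb x)

-- A's accumulation loop produces exactly the two filtered char lists (lengths equal)
theorem pvLoop_eq (a b : String) (hlen : a.length = b.length) :
    (PySem.List.pyRange 0 (a.length : Int) 1).foldl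
      (fun (p : List Char × List Char) i =>
        ((if !(PySem.Chars.isdigit (PySem.List.pyGetD a.toList i ' ')) then
            p.1 ++ [PySem.List.pyGetD a.toList i ' '] else p.1),
         (if !(PySem.Chars.isdigit (PySem.List.pyGetD b.toList i ' ')) then
            p.2 ++ [PySem.List.pyGetD b.toList i ' '] else p.2)))
      ([], [])
    = (a.toList.filter (fun c => !(PySem.Chars.isdigit c)),
       b.toList.filter (fun c => !(PySem.Chars.isdigit c))) := by
  rw [pvFoldl_pair (PySem.List.pyRange 0 (a.length : Int) 1)
    (fun (acc : List Char) (i : Int) =>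
      if (!PySem.Chars.isdigit (PySem.List.pyGetD a.toList i ' ')) = true then
        acc ++ [PySem.List.pyGetD a.toList i ' '] else acc)
    (fun (acc : List Char) (i : Int) =>
      if (!PySem.Chars.isdigit (PySem.List.pyGetD b.toList i ' ')) = true then
        acc ++ [PySem.List.pyGetD b.toList i ' '] else acc) [] []]
  have ha : (a.length : Int) = (a.toList.length : Int) := by simp
  have hb : (a.length : Int) = (b.toList.length : Int) := by simp [hlen]
  rw [Prod.mk.injEq]
  refine ⟨?_, ?_⟩
  · rw [ha, PySem.List.foldl_pyRange_zero_pyGetD' a.toList ' '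
      (fun acc c => if !(PySem.Chars.isdigit c) then acc ++ [c] else acc) []]
    simpa using PySem.List.foldl_append_if_eq_filter
      (fun c => !(PySem.Chars.isdigit c)) a.toList ([] : List Char)
  · rw [hb, PySem.List.foldl_pyRange_zero_pyGetD' b.toList ' '
      (fun acc c => if !(PySem.Chars.isdigit c) then acc ++ [c] else acc) []]
    simpa using PySem.List.foldl_append_if_eq_filter
      (fun c => !(PySem.Chars.isdigit c)) b.toList ([] : List Char)

theorem pvSkipIdx_le (s : List Char) (n i : Nat) (h : i ≤ n) : pvSkipIdx s n i ≤ n := by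
  fun_induction pvSkipIdx with
  | case1 i h' ih => exact ih (by omega)
  | case2 i h' => exact h

theorem pvSkipIdx_stop (s : List Char) (n i : Nat) :
    ¬ (pvSkipIdx s n i < n ∧ PySem.Chars.isdigit (s.getD (pvSkipIdx s n i) ' ')) := by
  fun_induction pvSkipIdx with
  | case1 i h' ih => exact ih
  | case2 i h' => simpa using h'

-- skipping leading digits does not change the digit-filtered suffix
theorem pvSkipIdx_filter_drop (s : List Char) (i : Nat) :
    (s.drop (pvSkipIdx s s.length i)).filter (fun c => !(PySem.Chars.isdigit c))
      = (s.drop i).filter (fun c => !(PySem.Chars.isdigit c)) := by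
  fun_induction pvSkipIdx with
  | case1 i h' ih =>
    have hd : PySem.Chars.isdigit s[i] = true := by
      have h2 := h'.2; rwa [List.getD_eq_getElem s ' ' h'.1] at h2
    rw [ih]
    have h3 : (s.drop i).filter (fun c => !(PySem.Chars.isdigit c))
        = (s.drop (i+1)).filter (fun c => !(PySem.Chars.isdigit c)) := by
      rw [List.drop_eq_getElem_cons h'.1, List.filter_cons_of_neg (by simp [hd])]
    exact h3.symm
  | case2 i h' => rfl

-- the filtered suffix at a non-digit in-range position starts with that character
theorem pvFilter_drop_cons (s : List Char) (k : Nat) (hk : k < s.length)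
    (hnd : ¬ PySem.Chars.isdigit (s.getD k ' ')) :
    (s.drop k).filter (fun c => !(PySem.Chars.isdigit c))
      = s.getD k ' ' :: (s.drop (k + 1)).filter (fun c => !(PySem.Chars.isdigit c)) := by
  have he : s.getD k ' ' = s[k] := List.getD_eq_getElem s ' ' hk
  rw [he] at hnd
  rw [List.drop_eq_getElem_cons hk, List.filter_cons_of_pos (by simp [hnd]), he]

-- equal heads: the three-way comparison of two lists is that of their tails
theorem pvCmp_cons (x : Char) (A B : List Char) :
    (if B < A then (1 : Int) else if A < B then -1 else 0)
      = (if (x :: B) < (x :: A) then (1 : Int) else if (x :: A) < (x :: B) then -1 else 0) := by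
  have hc : ∀ (U V : List Char), ((x :: U) < (x :: V)) ↔ U < V := by
    intro U V; rw [List.cons_lt_cons_iff]; simp
  simp only [hc]

-- different heads: the three-way comparison of two lists is that of their heads
theorem pvCmp_cons_ne (x y : Char) (hxy : x ≠ y) (A B : List Char) :
    (if y < x then (1 : Int) else -1)
      = (if (y :: B) < (x :: A) then (1 : Int) else if (x :: A) < (y :: B) then -1 else 0) := by
  rcases lt_trichotomy x y with h | h | h
  · rw [if_neg (fun hc => absurd h (not_lt.mpr (le_of_lt hc))),
      if_neg (by rw [List.cons_lt_cons_iff]; push Not;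
                 exact ⟨le_of_lt h, fun he => absurd he.symm hxy⟩),
      if_pos (by rw [List.cons_lt_cons_iff]; exact Or.inl h)]
  · exact absurd h hxy
  · rw [if_pos h, if_pos (by rw [List.cons_lt_cons_iff]; exact Or.inl h)]

-- the scan computes the three-way lexicographic comparison of the digit-filtered suffixes
theorem pvScan_eq (sa sb : List Char) (i j : Nat) (hn : sa.length = sb.length)
    (hi : i ≤ sa.length) (hj : j ≤ sb.length) :
    pvScan sa sb sa.length i j =
      (if (sb.drop j).filter (fun c => !(PySem.Chars.isdigit c))
            < (sa.drop i).filter (fun c => !(PySem.Chars.isdigit c)) then 1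
       else if (sa.drop i).filter (fun c => !(PySem.Chars.isdigit c))
            < (sb.drop j).filter (fun c => !(PySem.Chars.isdigit c)) then -1
       else 0) := by
  rw [pvScan]
  set n := sa.length with hdefn
  set k := pvSkipIdx sa n i with hdefk
  set l := pvSkipIdx sb n j with hdefl
  have hkge : i ≤ k := pvSkipIdx_ge sa n i
  have hlge : j ≤ l := pvSkipIdx_ge sb n j
  have hkle : k ≤ n := pvSkipIdx_le sa n i hi
  have hlle : l ≤ n := pvSkipIdx_le sb n j (hn ▸ hj)
  have hkf := pvSkipIdx_filter_drop sa i
  rw [← hdefn, ← hdefk] at hkf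
  have hlf := pvSkipIdx_filter_drop sb j
  rw [← hn, ← hdefl] at hlf
  rw [← hkf, ← hlf]
  by_cases hk : k ≥ n
  · have hkn : k = n := le_antisymm hkle hk
    have hea : (sa.drop k).filter (fun c => !(PySem.Chars.isdigit c)) = [] := by
      rw [hkn, hdefn, List.drop_length]; rfl
    by_cases hl : l ≥ n
    · have hln : l = n := le_antisymm hlle hl
      have heb : (sb.drop l).filter (fun c => !(PySem.Chars.isdigit c)) = [] := by
        rw [hln, hn, List.drop_length]; rfl
      simp [hk, hl, hea, heb]
    · have hlt : l < sb.length := by omega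
      have hnd : ¬ PySem.Chars.isdigit (sb.getD l ' ') := by
        have := pvSkipIdx_stop sb n j
        rw [← hdefl] at this
        intro hc; exact this ⟨by omega, hc⟩
      rw [pvFilter_drop_cons sb l hlt hnd, hea]
      have h1 : ¬ ((sb.getD l ' ' :: (sb.drop (l+1)).filter (fun c => !(PySem.Chars.isdigit c)))
          < ([] : List Char)) := by
        intro hc; exact absurd hc (by simp)
      have h2 : ([] : List Char) < sb.getD l ' ' :: (sb.drop (l+1)).filter
          (fun c => !(PySem.Chars.isdigit c)) := by
        simp
      simp [hk, hl]
  · by_cases hl : l ≥ n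
    · have hln : l = n := le_antisymm hlle hl
      have heb : (sb.drop l).filter (fun c => !(PySem.Chars.isdigit c)) = [] := by
        rw [hln, hn, List.drop_length]; rfl
      have hkt : k < sa.length := by omega
      have hnd : ¬ PySem.Chars.isdigit (sa.getD k ' ') := by
        have := pvSkipIdx_stop sa n i
        rw [← hdefk] at this
        intro hc; exact this ⟨by omega, hc⟩
      rw [pvFilter_drop_cons sa k hkt hnd, heb]
      have h1 : ([] : List Char) < sa.getD k ' ' :: (sa.drop (k+1)).filter
          (fun c => !(PySem.Chars.isdigit c)) := by
        simp
      simp [hk, hl]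
    · have hkt : k < sa.length := by omega
      have hlt : l < sb.length := by omega
      have hnda : ¬ PySem.Chars.isdigit (sa.getD k ' ') := by
        have := pvSkipIdx_stop sa n i
        rw [← hdefk] at this
        intro hc; exact this ⟨by omega, hc⟩
      have hndb : ¬ PySem.Chars.isdigit (sb.getD l ' ') := by
        have := pvSkipIdx_stop sb n j
        rw [← hdefl] at this
        intro hc; exact this ⟨by omega, hc⟩
      rw [pvFilter_drop_cons sa k hkt hnda, pvFilter_drop_cons sb l hlt hndb]
      by_cases hxy : sa.getD k ' ' = sb.getD l ' '
      · rw [if_neg (by simp [hk, hl]), if_neg (fun hc => hc hxy)]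
        have hrec := pvScan_eq sa sb (k + 1) (l + 1) hn (by omega) (by omega)
        rw [← hdefn] at hrec
        rw [hrec, ← hxy,
          pvCmp_cons (sa.getD k ' ')
            ((sa.drop (k + 1)).filter (fun c => !(PySem.Chars.isdigit c)))
            ((sb.drop (l + 1)).filter (fun c => !(PySem.Chars.isdigit c)))]
      · rw [if_neg (by simp [hk, hl]), if_pos hxy]
        exact pvCmp_cons_ne (sa.getD k ' ') (sb.getD l ' ') hxy
          ((sa.drop (k + 1)).filter (fun c => !(PySem.Chars.isdigit c)))
          ((sb.drop (l + 1)).filter (fun c => !(PySem.Chars.isdigit c)))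
  termination_by sa.length - i
  decreasing_by
    have := pvSkipIdx_ge sa sa.length i
    omega

-- ===== VERDICT (by name: the statement is the Claim_ definition above) =====
theorem sortFirstString_spec : Claim_equal_sortFirstString := by
  intro a b _
  unfold Spec_sortFirstString sortFirstString sortFirstString_alt
  by_cases hlen : a.length = b.length
  · simp only [gt_iff_lt]
    rw [if_neg (by simp [hlen]), if_neg (by simp [hlen]), pvLoop_eq a b hlen]
    simp only [String.lt_iff_toList_lt, String.toList_ofList]
    have hn : a.toList.length = b.toList.length := by simpa using hlen
    have hscan := pvScan_eq a.toList b.toList 0 0 hn (Nat.zero_le _) (Nat.zero_le _)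
    rw [if_neg (show ¬(a.length ≠ b.length) from by simp [hlen])]
    rw [show a.length = a.toList.length from by simp, hscan]
    simp only [List.drop_zero]
    rfl
  · simp only [gt_iff_lt]
    rw [if_pos hlen]
    rcases Nat.lt_or_ge a.length b.length with h | h
    · rw [if_neg (by exact_mod_cast not_lt.mpr (le_of_lt h)),
        if_pos (by exact_mod_cast h), if_neg (by omega)]
    · have h' : b.length < a.length := by omega
      rw [if_pos (by exact_mod_cast h'), if_pos h']
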